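-- pv_equiv track=rewrite | github.com/dylanhoke/Python-Algorithm-Exercises-Solutions | Various Exercises/findlongstr.py | solution
-- ===== SOURCE A (Python) =====
-- def solution(inputArray):
--
--     long_str = 0
--     str_list = []
--     for i in range(len(inputArray)):
--         if len(inputArray[i]) > long_str:
--             long_str = len(inputArray[i])
--             str_list = [inputArray[i]]
--         elif len(inputArray[i]) == long_str:
--             str_list.append(inputArray[i])
--         else:
--             pass
--     return str_list
-- ===== SOURCE B (Python) =====
-- def solution(inputArray):
--     if not inputArray:
--         return []
--     m = max(len(s) for s in inputArray)
--     return [s for s in inputArray if len(s) == m]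
-- ===== Notes on version B (the rewrite author's own statement) =====
-- stated objective: simpler
-- what changed: Replaces the single-pass running-max loop with mutable reset/append state by a two-pass decomposition: compute the maximum length with max(), then keep the strings of that length with a filtering comprehension (empty input guarded explicitly).
import Mathlib
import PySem

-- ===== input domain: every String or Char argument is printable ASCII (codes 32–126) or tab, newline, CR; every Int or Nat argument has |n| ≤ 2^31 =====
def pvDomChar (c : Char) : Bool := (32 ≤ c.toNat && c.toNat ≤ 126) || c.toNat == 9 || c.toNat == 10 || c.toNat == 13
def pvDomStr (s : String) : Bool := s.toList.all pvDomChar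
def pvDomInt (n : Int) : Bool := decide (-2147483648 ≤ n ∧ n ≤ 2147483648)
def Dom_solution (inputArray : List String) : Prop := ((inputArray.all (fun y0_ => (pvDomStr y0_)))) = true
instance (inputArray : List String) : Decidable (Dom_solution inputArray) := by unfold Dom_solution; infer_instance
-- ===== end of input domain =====

-- B replaces A's single-pass running-max loop (reset/append state) by a two-pass
-- decomposition: compute the maximum length, then filter; objective: simpler.


-- ===== PORT A =====
-- for i in range(len(inputArray)): running (long_str, str_list) state
def solutionStep (st : Int × List String) (s : String) : Int × List String :=
  if PySem.Str.len s > st.1 then (PySem.Str.len s, [s])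
  else if PySem.Str.len s == st.1 then (st.1, st.2 ++ [s])
  else st

def solution (inputArray : List String) : List String :=
  (inputArray.foldl solutionStep (0, [])).2

-- ===== PORT B =====
-- if not inputArray: return [] ; m = max(len(s) for s in inputArray) ; keep strings of length m
def solution_alt (inputArray : List String) : List String :=
  if inputArray.isEmpty then []
  else inputArray.filter (fun s => PySem.Str.len s ==
    (PySem.List.max? (inputArray.map PySem.Str.len) (fun y => y)).getD 0)

-- ===== PRECONDITION & SPEC =====
def Spec_solution (inputArray : List String) (out : List String) : Prop := out = solution_alt inputArray
instance (inputArray : List String) (out : List String) : Decidable (Spec_solution inputArray out) := by unfold Spec_solution; infer_instance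

-- ===== CLAIM (what is proved, stated in full; the proofs are below) =====
def Claim_equal_solution : Prop := ∀ (inputArray : List String), Dom_solution inputArray → Spec_solution inputArray (solution inputArray)

-- ===== LEMMAS AND PROOFS =====

-- A's loop invariant: first component is the running max of lengths, second is a
-- filter of the input at that max (stated in the ↑·.length normal form of Str.len).
theorem solutionStep_loop (l : List String) (m : Int) (acc : List String) :
    (l.foldl solutionStep (m, acc)).1
        = l.foldl (fun a s => max a ((s.toList.length : Int))) m ∧
    (l.foldl solutionStep (m, acc)).2
        = (if m < l.foldl (fun a s => max a ((s.toList.length : Int))) m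
           then l.filter (fun s => (s.toList.length : Int) == l.foldl (fun a s => max a ((s.toList.length : Int))) m)
           else acc ++ l.filter (fun s => (s.toList.length : Int) == m)) := by
  induction l generalizing m acc with
  | nil => simp
  | cons s t ih =>
    have hmax := (PySem.List.le_foldl_max_int t (fun y => (y.toList.length : Int))
      (max m (s.toList.length : Int))).1
    rcases lt_trichotomy ((s.toList.length : Int)) m with h | h | h
    · have hstep : solutionStep (m, acc) s = (m, acc) := by
        simp only [solutionStep, PySem.Str.len_eq, gt_iff_lt, beq_iff_eq]
        rw [if_neg (by omega), if_neg (by omega)]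
      have hm : max m (s.toList.length : Int) = m := max_eq_left h.le
      obtain ⟨ih1, ih2⟩ := ih m acc
      clear ih
      refine ⟨by simp only [List.foldl_cons, hstep, hm]; exact ih1, ?_⟩
      rw [hm] at hmax
      simp only [List.foldl_cons, hstep, hm, ih2, List.filter_cons, beq_iff_eq]
      split_ifs with h1 h2 <;> first | rfl | omega
    · have hstep : solutionStep (m, acc) s = (m, acc ++ [s]) := by
        simp only [solutionStep, PySem.Str.len_eq, gt_iff_lt, beq_iff_eq]
        rw [if_neg (by omega), if_pos h]
      have hm : max m (s.toList.length : Int) = m := by omega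
      obtain ⟨ih1, ih2⟩ := ih m (acc ++ [s])
      clear ih
      refine ⟨by simp only [List.foldl_cons, hstep, hm]; exact ih1, ?_⟩
      rw [hm] at hmax
      simp only [List.foldl_cons, hstep, hm, ih2, List.filter_cons, beq_iff_eq]
      split_ifs with h1 h2 <;> first | rfl | (simp; omega) | simp
    · have hstep : solutionStep (m, acc) s = ((s.toList.length : Int), [s]) := by
        simp only [solutionStep, PySem.Str.len_eq, gt_iff_lt, beq_iff_eq]
        rw [if_pos h]
      have hm : max m (s.toList.length : Int) = (s.toList.length : Int) := max_eq_right h.le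
      obtain ⟨ih1, ih2⟩ := ih ((s.toList.length : Int)) [s]
      clear ih
      refine ⟨by simp only [List.foldl_cons, hstep, hm]; exact ih1, ?_⟩
      rw [hm] at hmax
      simp only [List.foldl_cons, hstep, hm, ih2, List.filter_cons, beq_iff_eq]
      rcases lt_or_eq_of_le hmax with hlt | heq
      · split_ifs with h1 h2 <;> first | rfl | omega
      · rw [← heq]
        split_ifs with h1 h2 <;> first | rfl | omega

-- ===== VERDICT (by name: the statement is the Claim_ definition above) =====
theorem solution_spec : Claim_equal_solution := by
  intro l _
  unfold Spec_solution solution solution_alt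
  cases l with
  | nil => simp
  | cons x t =>
    obtain ⟨-, h2⟩ := solutionStep_loop (x :: t) 0 []
    have hge := (PySem.List.le_foldl_max_int (x :: t) (fun y => (y.toList.length : Int)) 0).1
    have hm : (PySem.List.max? ((x :: t).map PySem.Str.len) (fun y => y)).getD 0
        = (x :: t).foldl (fun a s => max a ((s.toList.length : Int))) 0 := by
      rw [List.map_cons, PySem.List.max?_id_cons]
      simp only [Option.getD_some, List.foldl_cons]
      rw [List.foldl_map]
      simp [PySem.Str.len_eq]
    rw [if_neg (by simp)]
    simp only [PySem.Str.len_eq, hm, h2]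
    split_ifs with h
    · rfl
    · have h0 : (x :: t).foldl (fun a s => max a ((s.toList.length : Int))) 0 = 0 := by omega
      simp only [List.nil_append, h0]
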